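-- pv_equiv track=rewrite | github.com/WinstonPHz/Advent_of_code | 2021/day10/day10.py | get_cor
-- ===== SOURCE A (Python) =====
-- def get_cor(puzzle):
--     closed = ["<>", "{}", "[]", "()"]
--     close_b = [">", "]", ")", "}"]
--     puz = puzzle
--     while True:
--         old_len = len(puz)
--         for cp in closed:
--            puz = puz.replace(cp, "")
--         if len(puz) == old_len:
--             break
--     for char in puz:
--         if char in close_b:
--             return True, char
--     return False, puz
-- ===== SOURCE B (Python) =====
-- def get_cor(puzzle):
--     pairs = {">": "<", "}": "{", "]": "[", ")": "("}
--     stack = []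
--     for ch in puzzle:
--         if ch in pairs and stack and stack[-1] == pairs[ch]:
--             stack.pop()
--         else:
--             stack.append(ch)
--     for ch in stack:
--         if ch in pairs:
--             return True, ch
--     return False, "".join(stack)
-- ===== Notes on version B (the rewrite author's own statement) =====
-- stated objective: alternative
-- what changed: Replaces A's repeated full-string replace() passes until a fixpoint with a single left-to-right pass maintaining a stack that cancels matched adjacent bracket pairs; worst-case O(n) passes of A become one pass, but on the measured inputs B is not faster.
import Mathlib
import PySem

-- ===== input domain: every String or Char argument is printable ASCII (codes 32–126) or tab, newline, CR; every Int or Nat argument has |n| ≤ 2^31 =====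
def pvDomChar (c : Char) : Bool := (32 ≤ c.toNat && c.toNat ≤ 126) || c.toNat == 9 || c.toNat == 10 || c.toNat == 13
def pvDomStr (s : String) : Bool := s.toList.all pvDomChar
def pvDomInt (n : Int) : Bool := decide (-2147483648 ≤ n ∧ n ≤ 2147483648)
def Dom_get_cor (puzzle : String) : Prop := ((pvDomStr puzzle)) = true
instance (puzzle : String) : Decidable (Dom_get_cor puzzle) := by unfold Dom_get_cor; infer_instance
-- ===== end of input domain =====

-- B replaces A's repeated whole-string replace() passes (fixpoint) by one
-- left-to-right pass with a stack cancelling matched bracket pairs (alternative algorithm, same result).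


-- ===== PORT A =====
-- closed = ["<>", "{}", "[]", "()"]
def closedPairs : List (List Char) := [['<','>'], ['{','}'], ['[',']'], ['(',')']]
-- close_b = [">", "]", ")", "}"]
def closeB : List Char := ['>', ']', ')', '}']

-- one pass of the inner `for cp in closed: puz = puz.replace(cp, "")`
def replOnce (p : List Char) : List Char :=
  closedPairs.foldl (fun s cp => PySem.Chars.replace s cp []) p

theorem go_length_le (old : List Char) (fuel : Nat) (l acc : List Char) :
    (PySem.Chars.replace.go old [] fuel l acc).length ≤ acc.length + l.length := by
  induction fuel generalizing l acc with
  | zero => simp [PySem.Chars.replace.go]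
  | succ fuel ih =>
    cases l with
    | nil => simp [PySem.Chars.replace.go]
    | cons c t =>
      rw [PySem.Chars.replace.go]
      split
      · simp only [List.reverse_nil, List.nil_append]
        have h := ih (List.drop old.length (c :: t)) acc
        have : (List.drop old.length (c :: t)).length ≤ (c :: t).length := by
          simp [List.length_drop]
        omega
      · have h := ih t (c :: acc)
        simp only [List.length_cons] at *
        omega

theorem replace_length_le (s old : List Char) (h : old ≠ []) :
    (PySem.Chars.replace s old []).length ≤ s.length := by
  rw [PySem.Chars.replace, if_neg (by simp [List.isEmpty_iff, h])]
  have := go_length_le old s.length s []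
  simpa using this

theorem replOnce_length_le (p : List Char) : (replOnce p).length ≤ p.length := by
  simp only [replOnce, closedPairs, List.foldl]
  have h1 := replace_length_le p ['<','>'] (by decide)
  have h2 := replace_length_le (PySem.Chars.replace p ['<','>'] []) ['{','}'] (by decide)
  have h3 := replace_length_le (PySem.Chars.replace (PySem.Chars.replace p ['<','>'] []) ['{','}'] []) ['[',']'] (by decide)
  have h4 := replace_length_le (PySem.Chars.replace (PySem.Chars.replace (PySem.Chars.replace p ['<','>'] []) ['{','}'] []) ['[',']'] []) ['(',')'] (by decide)
  omega

-- the `while True:` loop of A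
def loopA (p : List Char) : List Char :=
  if (replOnce p).length = p.length then replOnce p else loopA (replOnce p)
termination_by p.length
decreasing_by
  have := replOnce_length_le p
  omega

def get_cor (puzzle : String) : Bool × String :=
  let puz := loopA puzzle.toList
  -- for char in puz: if char in close_b: return True, char
  match puz.find? (fun ch => closeB.contains ch) with
  | some ch => (true, String.ofList [ch])
  | none => (false, String.ofList puz)

-- ===== PORT B =====
-- pairs = {">": "<", "}": "{", "]": "[", ")": "("} as a lookup function
def mate (c : Char) : Option Char :=
  if c = '>' then some '<'
  else if c = '}' then some '{'
  else if c = ']' then some '['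
  else if c = ')' then some '('
  else none

-- loop body; the stack is kept head = top (Python's stack[-1])
def stepB (st : List Char) (ch : Char) : List Char :=
  match mate ch with
  | some o =>
    match st with
    | t :: rest => if t = o then rest else ch :: st
    | [] => [ch]
  | none => ch :: st

def get_cor_alt (puzzle : String) : Bool × String :=
  let stack := puzzle.toList.foldl stepB []
  let res := stack.reverse   -- Python's stack read bottom-to-top
  match res.find? (fun ch => (mate ch).isSome) with
  | some ch => (true, String.ofList [ch])
  | none => (false, String.ofList res)

-- ===== PRECONDITION & SPEC =====
def Spec_get_cor (puzzle : String) (out : Bool × String) : Prop := out = get_cor_alt puzzle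
instance (puzzle : String) (out : Bool × String) : Decidable (Spec_get_cor puzzle out) := by unfold Spec_get_cor; infer_instance

-- ===== CLAIM (what is proved, stated in full; the proofs are below) =====
def Claim_equal_get_cor : Prop := ∀ (puzzle : String), Dom_get_cor puzzle → Spec_get_cor puzzle (get_cor puzzle)

-- ===== LEMMAS AND PROOFS =====

-- a character is an opener of one of the four pairs
def isOpen (c : Char) : Prop := c = '<' ∨ c = '{' ∨ c = '[' ∨ c = '('

theorem mate_open {o : Char} (ho : isOpen o) : mate o = none := by
  rcases ho with h | h | h | h <;> subst h <;> decide

theorem mate_cases {a b : Char} (h : mate b = some a) :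
    (a = '<' ∧ b = '>') ∨ (a = '{' ∧ b = '}') ∨ (a = '[' ∧ b = ']') ∨ (a = '(' ∧ b = ')') := by
  unfold mate at h
  split_ifs at h <;> simp_all [eq_comm]

-- pushing an opener and then its closer cancels
theorem step_open {o : Char} (ho : isOpen o) (st : List Char) : stepB st o = o :: st := by
  unfold stepB
  rw [mate_open ho]

theorem step_close {o c : Char} (hm : mate c = some o) (st : List Char) :
    stepB (o :: st) c = st := by
  unfold stepB
  rw [hm]
  simp

-- replacing one matched pair by "" leaves the stack fold unchanged
theorem go_fold (o c : Char) (ho : isOpen o) (hm : mate c = some o)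
    (fuel : Nat) (l acc st : List Char) (hf : l.length ≤ fuel) :
    List.foldl stepB st (PySem.Chars.replace.go [o, c] [] fuel l acc) =
      List.foldl stepB st (acc.reverse ++ l) := by
  induction fuel generalizing l acc with
  | zero =>
    have : l = [] := by cases l <;> simp_all
    subst this
    simp [PySem.Chars.replace.go]
  | succ fuel ih =>
    cases l with
    | nil => simp [PySem.Chars.replace.go]
    | cons ch t =>
      rw [PySem.Chars.replace.go]
      split
      · rename_i hpre
        obtain ⟨w, hw⟩ := List.isPrefixOf_iff_prefix.mp hpre
        simp only [List.cons_append, List.nil_append, List.cons.injEq] at hw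
        obtain ⟨hch, hcw⟩ := hw
        subst hch
        have hdrop : List.drop ([o, c] : List Char).length (o :: t) = w := by
          rw [← hcw]; rfl
        rw [hdrop]
        simp only [List.reverse_nil, List.nil_append]
        have hlen : w.length ≤ fuel := by
          have : t.length = w.length + 1 := by rw [← hcw]; simp
          simp only [List.length_cons] at hf
          omega
        rw [ih w acc hlen]
        conv_rhs => rw [← hcw]
        rw [List.foldl_append, List.foldl_append, List.foldl_cons,
            step_open ho, List.foldl_cons, step_close hm]
      · rw [ih t (ch :: acc) (by simp at hf ⊢; omega)]
        simp

theorem replace_fold (o c : Char) (ho : isOpen o) (hm : mate c = some o)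
    (s st : List Char) :
    List.foldl stepB st (PySem.Chars.replace s [o, c] []) = List.foldl stepB st s := by
  rw [PySem.Chars.replace, if_neg (by simp)]
  have := go_fold o c ho hm s.length s [] st le_rfl
  simpa using this

theorem replOnce_fold (p st : List Char) :
    List.foldl stepB st (replOnce p) = List.foldl stepB st p := by
  simp only [replOnce, closedPairs, List.foldl]
  rw [replace_fold '(' ')' (by simp [isOpen]) (by decide),
      replace_fold '[' ']' (by simp [isOpen]) (by decide),
      replace_fold '{' '}' (by simp [isOpen]) (by decide),
      replace_fold '<' '>' (by simp [isOpen]) (by decide)]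

theorem loopA_fold (p st : List Char) :
    List.foldl stepB st (loopA p) = List.foldl stepB st p := by
  rw [loopA.eq_def]
  split
  · exact replOnce_fold p st
  · rw [loopA_fold (replOnce p) st, replOnce_fold]
termination_by p.length
decreasing_by
  have := replOnce_length_le p
  omega

-- if a replace changed nothing (same length), it was the identity
theorem go_len_eq (old : List Char) (hold : old ≠ []) (fuel : Nat) (l acc : List Char)
    (h : (PySem.Chars.replace.go old [] fuel l acc).length = acc.length + l.length) :
    PySem.Chars.replace.go old [] fuel l acc = acc.reverse ++ l := by
  induction fuel generalizing l acc with
  | zero => simp [PySem.Chars.replace.go]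
  | succ fuel ih =>
    cases l with
    | nil => simp [PySem.Chars.replace.go]
    | cons ch t =>
      rw [PySem.Chars.replace.go] at h ⊢
      split at h
      · rename_i hpre
        exfalso
        have hle := go_length_le old fuel (List.drop old.length (ch :: t)) ([].reverse ++ acc)
        have holdlen : 1 ≤ old.length := by cases old <;> simp_all
        have hpl : old.length ≤ (ch :: t).length :=
          List.IsPrefix.length_le (List.isPrefixOf_iff_prefix.mp hpre)
        simp only [List.length_drop, List.reverse_nil, List.nil_append, List.length_cons] at hle h hpl
        omega
      · rename_i hpre
        have := ih t (ch :: acc) (by simp at h ⊢; omega)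
        rw [this]
        simp
        intro hpf
        exact absurd (List.isPrefixOf_iff_prefix.mpr hpf) hpre

theorem replace_len_eq {s old : List Char} (hold : old ≠ [])
    (h : (PySem.Chars.replace s old []).length = s.length) :
    PySem.Chars.replace s old [] = s := by
  rw [PySem.Chars.replace, if_neg (by simp [List.isEmpty_iff, hold])] at h ⊢
  have := go_len_eq old hold s.length s [] (by simpa using h)
  simpa using this

-- a string fixed by `replace [o,c] ""` contains no adjacent pair o,c
theorem no_occ_of_fixed {s : List Char} {o c : Char} (hfix : PySem.Chars.replace s [o, c] [] = s) :
    ∀ u v, s ≠ u ++ o :: c :: v := by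
  intro u v heq
  have hlt : (PySem.Chars.replace s [o, c] []).length < s.length := by
    rw [PySem.Chars.replace, if_neg (by simp)]
    -- walk go to the occurrence
    have key : ∀ fuel (l acc u v : List Char), l = u ++ o :: c :: v → l.length ≤ fuel →
        (PySem.Chars.replace.go [o, c] [] fuel l acc).length < acc.length + l.length := by
      intro fuel
      induction fuel with
      | zero => intro l acc u v hl hf; subst hl; simp at hf
      | succ fuel ih =>
        intro l acc u v hl hf
        cases l with
        | nil => simp at hl
        | cons ch t =>
          rw [PySem.Chars.replace.go]
          split
          · rename_i hpre
            have hle := go_length_le [o, c] fuel (List.drop ([o, c] : List Char).length (ch :: t)) ([].reverse ++ acc)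
            have h2 : 2 ≤ (ch :: t).length :=
              List.IsPrefix.length_le (List.isPrefixOf_iff_prefix.mp hpre)
            simp only [List.length_drop, List.reverse_nil, List.nil_append, List.length_cons] at hle h2 ⊢
            omega
          · rename_i hpre
            cases u with
            | nil =>
              exfalso
              apply hpre
              rw [List.isPrefixOf_iff_prefix]
              simp only [List.nil_append, List.cons.injEq] at hl
              exact ⟨v, by rw [hl.1, hl.2]; rfl⟩
            | cons a u' =>
              simp only [List.cons_append, List.cons.injEq] at hl
              have := ih t (ch :: acc) u' v hl.2 (by simp at hf ⊢; omega)
              simp only [List.length_cons] at this ⊢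
              omega
    have := key s.length s [] u v heq le_rfl
    simpa using this
  rw [hfix] at hlt
  omega

-- the stack top never matches the next character
def compat (st l : List Char) : Prop :=
  ∀ (top : Char) (rest : List Char) (ch : Char) (tl : List Char),
    st = top :: rest → l = ch :: tl → mate ch ≠ some top

-- on a string with no adjacent matched pair, the fold just pushes everything
theorem fold_nf (l : List Char)
    (hno : ∀ (o c : Char), mate c = some o → ∀ u v, l ≠ u ++ o :: c :: v) :
    ∀ st : List Char, compat st l → List.foldl stepB st l = l.reverse ++ st := by
  induction l with
  | nil => intro st _; simp
  | cons ch t ih =>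
    intro st hc
    have hstep : stepB st ch = ch :: st := by
      unfold stepB
      cases hm : mate ch with
      | none => rfl
      | some o =>
        cases st with
        | nil => rfl
        | cons top rest =>
          simp only
          rw [if_neg]
          intro htop
          exact hc top rest ch t rfl rfl (htop ▸ hm)
    rw [List.foldl_cons, hstep]
    rw [ih (fun o c hm u v hl => hno o c hm (ch :: u) v (by simp [hl])) (ch :: st) ?_]
    · simp
    · intro top rest ch2 tl hst hl hm2
      have : ch = top := by injection hst
      exact hno top ch2 (this ▸ hm2) [] tl (by rw [hl, this]; rfl)


-- if one pass of the four replaces did not change the length, the string is fixed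
theorem replOnce_fix (s : List Char) (hlen : (replOnce s).length = s.length) :
    replOnce s = s ∧ ∀ cp ∈ closedPairs, PySem.Chars.replace s cp [] = s := by
  have hrepl : replOnce s =
      PySem.Chars.replace (PySem.Chars.replace (PySem.Chars.replace
        (PySem.Chars.replace s ['<','>'] []) ['{','}'] []) ['[',']'] []) ['(',')'] [] := by
    simp only [replOnce, closedPairs, List.foldl]
  have l1 := replace_length_le s ['<','>'] (by decide)
  have l2 := replace_length_le (PySem.Chars.replace s ['<','>'] []) ['{','}'] (by decide)
  have l3 := replace_length_le (PySem.Chars.replace (PySem.Chars.replace s ['<','>'] []) ['{','}'] []) ['[',']'] (by decide)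
  have l4 := replace_length_le (PySem.Chars.replace (PySem.Chars.replace (PySem.Chars.replace s ['<','>'] []) ['{','}'] []) ['[',']'] []) ['(',')'] (by decide)
  rw [hrepl] at hlen
  have e1 : PySem.Chars.replace s ['<','>'] [] = s := replace_len_eq (by decide) (by omega)
  have e2' := replace_len_eq (s := PySem.Chars.replace s ['<','>'] []) (old := ['{','}']) (by decide) (by omega)
  have e2 : PySem.Chars.replace s ['{','}'] [] = s := by rw [e1] at e2'; exact e2'
  have e3' := replace_len_eq (s := PySem.Chars.replace (PySem.Chars.replace s ['<','>'] []) ['{','}'] []) (old := ['[',']']) (by decide) (by omega)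
  have e3 : PySem.Chars.replace s ['[',']'] [] = s := by rw [e1, e2] at e3'; exact e3'
  have e4' := replace_len_eq (s := PySem.Chars.replace (PySem.Chars.replace (PySem.Chars.replace s ['<','>'] []) ['{','}'] []) ['[',']'] []) (old := ['(',')']) (by decide) (by omega)
  have e4 : PySem.Chars.replace s ['(',')'] [] = s := by rw [e1, e2, e3] at e4'; exact e4'
  refine ⟨by rw [hrepl, e1, e2, e3, e4], ?_⟩
  intro cp hcp
  fin_cases hcp
  · exact e1
  · exact e2
  · exact e3
  · exact e4

-- the loop's result is a fixpoint of each of the four replaces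
theorem loopA_fixed (p : List Char) :
    ∀ cp ∈ closedPairs, PySem.Chars.replace (loopA p) cp [] = loopA p := by
  rw [loopA.eq_def]
  split
  · rename_i hlen
    intro cp hcp
    obtain ⟨hfix, hall⟩ := replOnce_fix p hlen
    rw [hfix]
    exact hall cp hcp
  · exact loopA_fixed (replOnce p)
termination_by p.length
decreasing_by
  have := replOnce_length_le p
  omega

theorem loopA_no_occ (p : List Char) :
    ∀ (o c : Char), mate c = some o → ∀ u v, loopA p ≠ u ++ o :: c :: v := by
  intro o c hm
  have hfix := loopA_fixed p
  rcases mate_cases hm with ⟨h1, h2⟩ | ⟨h1, h2⟩ | ⟨h1, h2⟩ | ⟨h1, h2⟩ <;>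
    subst h1 <;> subst h2 <;>
    exact no_occ_of_fixed (hfix _ (by simp [closedPairs])) 

-- A's residual string IS B's stack (read bottom-to-top)
theorem loopA_eq_stack (p : List Char) :
    loopA p = (List.foldl stepB [] p).reverse := by
  have h1 := loopA_fold p []
  have h2 := fold_nf (loopA p) (loopA_no_occ p) []
    (fun top rest ch tl hst _ => by cases hst)
  rw [h1] at h2
  simp only [List.append_nil] at h2
  rw [h2, List.reverse_reverse]

-- the two membership tests agree
theorem closer_pred : (fun ch => closeB.contains ch) = (fun ch => (mate ch).isSome) := by
  funext ch
  simp only [closeB, mate, List.contains]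
  split_ifs with h1 h2 h3 h4 <;> simp_all

-- ===== VERDICT (by name: the statement is the Claim_ definition above) =====
theorem get_cor_spec : Claim_equal_get_cor := by
  intro puzzle _
  unfold Spec_get_cor get_cor get_cor_alt
  rw [loopA_eq_stack puzzle.toList, closer_pred]
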